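-- pv_equiv track=rewrite | github.com/kryptologyst/Churn-Prediction-Model | src/utils/utils.py | get_feature_categories
-- ===== SOURCE A (Python) =====
-- from typing import Dict, Any, List, Tuple, Optional
--
-- def get_feature_categories(feature_names: List[str]) -> Dict[str, List[str]]:
--     """Categorize features into business-relevant groups.
--
--     Args:
--         feature_names: List of feature names
--
--     Returns:
--         Dictionary mapping categories to feature lists
--     """
--     categories = {
--         'demographics': [],
--         'service_usage': [],
--         'billing': [],
--         'contract': [],
--         'engagement': [],
--         'engineered': [],
--         'other': []
--     }
--
--     for feature in feature_names:
--         feature_lower = feature.lower()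
--
--         if any(keyword in feature_lower for keyword in ['gender', 'senior', 'partner', 'dependent']):
--             categories['demographics'].append(feature)
--         elif any(keyword in feature_lower for keyword in ['phone', 'internet', 'online', 'streaming', 'tech']):
--             categories['service_usage'].append(feature)
--         elif any(keyword in feature_lower for keyword in ['charge', 'billing', 'payment']):
--             categories['billing'].append(feature)
--         elif any(keyword in feature_lower for keyword in ['contract', 'tenure']):
--             categories['contract'].append(feature)
--         elif any(keyword in feature_lower for keyword in ['paperless', 'multiple']):
--             categories['engagement'].append(feature)
--         elif any(keyword in feature_lower for keyword in ['avg', 'high', 'long', 'senior_high']):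
--             categories['engineered'].append(feature)
--         else:
--             categories['other'].append(feature)
--
--     # Remove empty categories
--     return {k: v for k, v in categories.items() if v}
-- ===== SOURCE B (Python) =====
-- _TABLE = [
--     ('demographics', ['gender', 'senior', 'partner', 'dependent']),
--     ('service_usage', ['phone', 'internet', 'online', 'streaming', 'tech']),
--     ('billing', ['charge', 'billing', 'payment']),
--     ('contract', ['contract', 'tenure']),
--     ('engagement', ['paperless', 'multiple']),
--     ('engineered', ['avg', 'high', 'long', 'senior_high']),
-- ]
--
--
-- def get_feature_categories(feature_names):
--     # Staged elimination: one pass per category over a shrinking worklist.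
--     result = {}
--     remaining = list(feature_names)
--     for name, keywords in _TABLE:
--         matched, rest = [], []
--         for f in remaining:
--             if any(k in f.lower() for k in keywords):
--                 matched.append(f)
--             else:
--                 rest.append(f)
--         if matched:
--             result[name] = matched
--         remaining = rest
--     if remaining:
--         result['other'] = remaining
--     return result
-- ===== Notes on version B (the rewrite author's own statement) =====
-- stated objective: alternative
-- what changed: A's feature-major single pass (an elif chain appending each feature into a mutable dict, then dropping empty keys) is replaced by category-major staged elimination: one partition pass per category over a shrinking worklist, consuming the matched features and carrying the rest to the next category, leftovers becoming 'other'.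
import Mathlib
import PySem

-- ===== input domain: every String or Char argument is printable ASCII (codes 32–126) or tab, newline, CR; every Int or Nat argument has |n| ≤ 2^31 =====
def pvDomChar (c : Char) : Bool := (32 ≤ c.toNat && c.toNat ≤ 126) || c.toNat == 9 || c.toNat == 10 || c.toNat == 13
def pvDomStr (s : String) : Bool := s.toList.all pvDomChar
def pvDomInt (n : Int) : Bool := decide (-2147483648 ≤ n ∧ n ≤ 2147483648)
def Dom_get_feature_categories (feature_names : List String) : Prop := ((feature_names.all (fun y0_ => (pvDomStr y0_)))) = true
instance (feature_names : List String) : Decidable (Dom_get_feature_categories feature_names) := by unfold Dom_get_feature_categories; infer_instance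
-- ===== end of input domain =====

-- B replaces A's feature-major elif chain over a mutable dict by category-major staged
-- elimination: one partition pass per category over a shrinking worklist (alternative, same cost).


-- ===== PORT A =====
def get_feature_categories (feature_names : List String) : List (String × List String) :=
  let categories : PySem.Dict String (List String) :=
    PySem.Dict.ofList [("demographics", []), ("service_usage", []), ("billing", []),
      ("contract", []), ("engagement", []), ("engineered", []), ("other", [])]
  let categories := feature_names.foldl (fun cats feature =>
    let fl := PySem.Str.lower feature
    if ["gender", "senior", "partner", "dependent"].any (fun kw => PySem.Str.isIn kw fl) then
      cats.modify "demographics" [] (· ++ [feature])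
    else if ["phone", "internet", "online", "streaming", "tech"].any (fun kw => PySem.Str.isIn kw fl) then
      cats.modify "service_usage" [] (· ++ [feature])
    else if ["charge", "billing", "payment"].any (fun kw => PySem.Str.isIn kw fl) then
      cats.modify "billing" [] (· ++ [feature])
    else if ["contract", "tenure"].any (fun kw => PySem.Str.isIn kw fl) then
      cats.modify "contract" [] (· ++ [feature])
    else if ["paperless", "multiple"].any (fun kw => PySem.Str.isIn kw fl) then
      cats.modify "engagement" [] (· ++ [feature])
    else if ["avg", "high", "long", "senior_high"].any (fun kw => PySem.Str.isIn kw fl) then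
      cats.modify "engineered" [] (· ++ [feature])
    else
      cats.modify "other" [] (· ++ [feature])) categories
  -- {k: v for k, v in categories.items() if v}
  (categories.items.foldl (fun d p => if p.2.isEmpty then d else d.insert p.1 p.2)
    (PySem.Dict.empty : PySem.Dict String (List String))).items

-- ===== PORT B =====
def pvTable : List (String × List String) :=
  [("demographics", ["gender", "senior", "partner", "dependent"]),
   ("service_usage", ["phone", "internet", "online", "streaming", "tech"]),
   ("billing", ["charge", "billing", "payment"]),
   ("contract", ["contract", "tenure"]),
   ("engagement", ["paperless", "multiple"]),
   ("engineered", ["avg", "high", "long", "senior_high"])]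

def pvCond (keywords : List String) (f : String) : Bool :=
  keywords.any (fun kw => PySem.Str.isIn kw (PySem.Str.lower f))

-- staged elimination: per category, partition the remaining worklist (dict keys are fresh,
-- so the result dict is built as an insertion-order association list by appending)
def get_feature_categories_alt (feature_names : List String) : List (String × List String) :=
  let st := pvTable.foldl
    (fun (st : List (String × List String) × List String) e =>
      let p := st.2.partition (fun f => pvCond e.2 f)
      (if p.1.isEmpty then st.1 else st.1 ++ [(e.1, p.1)], p.2))
    ([], feature_names)
  if st.2.isEmpty then st.1 else st.1 ++ [("other", st.2)]

-- ===== PRECONDITION & SPEC =====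
def Spec_get_feature_categories (feature_names : List String) (out : List (String × List String)) : Prop := out = get_feature_categories_alt feature_names
instance (feature_names : List String) (out : List (String × List String)) : Decidable (Spec_get_feature_categories feature_names out) := by unfold Spec_get_feature_categories; infer_instance

-- ===== CLAIM (what is proved, stated in full; the proofs are below) =====
def Claim_equal_get_feature_categories : Prop := ∀ (feature_names : List String), Dom_get_feature_categories feature_names → Spec_get_feature_categories feature_names (get_feature_categories feature_names)

-- ===== LEMMAS AND PROOFS =====
def pvNames : List String :=
  ["demographics", "service_usage", "billing", "contract", "engagement", "engineered", "other"]

-- first-match category of a feature within a (suffix of the) table; proof-only helper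
def pvCatIn (t : List (String × List String)) (f : String) : String :=
  match t with
  | [] => "other"
  | e :: t' => if pvCond e.2 f then e.1 else pvCatIn t' f

def pvCategory (f : String) : String := pvCatIn pvTable f

lemma pv_cat_ite (feature : String) :
    pvCategory feature =
      (if pvCond ["gender", "senior", "partner", "dependent"] feature then "demographics"
       else if pvCond ["phone", "internet", "online", "streaming", "tech"] feature then "service_usage"
       else if pvCond ["charge", "billing", "payment"] feature then "billing"
       else if pvCond ["contract", "tenure"] feature then "contract"
       else if pvCond ["paperless", "multiple"] feature then "engagement"
       else if pvCond ["avg", "high", "long", "senior_high"] feature then "engineered"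
       else "other") := by
  simp [pvCategory, pvTable, pvCatIn]

lemma pv_step_eq (cats : PySem.Dict String (List String)) (feature : String) :
    (let fl := PySem.Str.lower feature
    if ["gender", "senior", "partner", "dependent"].any (fun kw => PySem.Str.isIn kw fl) then
      cats.modify "demographics" [] (· ++ [feature])
    else if ["phone", "internet", "online", "streaming", "tech"].any (fun kw => PySem.Str.isIn kw fl) then
      cats.modify "service_usage" [] (· ++ [feature])
    else if ["charge", "billing", "payment"].any (fun kw => PySem.Str.isIn kw fl) then
      cats.modify "billing" [] (· ++ [feature])
    else if ["contract", "tenure"].any (fun kw => PySem.Str.isIn kw fl) then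
      cats.modify "contract" [] (· ++ [feature])
    else if ["paperless", "multiple"].any (fun kw => PySem.Str.isIn kw fl) then
      cats.modify "engagement" [] (· ++ [feature])
    else if ["avg", "high", "long", "senior_high"].any (fun kw => PySem.Str.isIn kw fl) then
      cats.modify "engineered" [] (· ++ [feature])
    else
      cats.modify "other" [] (· ++ [feature])) = cats.modify (pvCategory feature) [] (· ++ [feature]) := by
  rw [pv_cat_ite]
  show (if pvCond _ feature then _ else if pvCond _ feature then _
    else if pvCond _ feature then _ else if pvCond _ feature then _
    else if pvCond _ feature then _ else if pvCond _ feature then _ else _) = _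
  split_ifs <;> rfl

lemma pv_catIn_mem (t : List (String × List String)) (f : String) :
    pvCatIn t f = "other" ∨ pvCatIn t f ∈ t.map (·.1) := by
  induction t with
  | nil => exact Or.inl rfl
  | cons e t' ih =>
    simp only [pvCatIn]
    split_ifs
    · exact Or.inr (by simp)
    · rcases ih with h | h
      · exact Or.inl h
      · exact Or.inr (by simp [h])

lemma pv_category_mem (f : String) : pvCategory f ∈ pvNames := by
  rcases pv_catIn_mem pvTable f with h | h
  · rw [pvCategory, h]; decide
  · rw [pvCategory]
    have : pvTable.map (·.1) ⊆ pvNames := by decide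
    exact this h

def pvD0 : PySem.Dict String (List String) :=
  PySem.Dict.ofList [("demographics", []), ("service_usage", []), ("billing", []),
    ("contract", []), ("engagement", []), ("engineered", []), ("other", [])]

lemma pv_d0_getD (c : String) : pvD0.getD c [] = [] := by
  rw [show pvD0 = PySem.Dict.mk [("demographics", []), ("service_usage", []), ("billing", []),
    ("contract", []), ("engagement", []), ("engineered", []), ("other", [])] from by decide]
  simp [PySem.Dict.getD_eq_get?_getD, PySem.Dict.get?_mk_cons]
  split_ifs <;> rfl

lemma pv_loop_eq_pairs (l : List String) :
    l.foldl (fun d f => d.modify (pvCategory f) [] (· ++ [f])) pvD0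
      = (l.map (fun f => (pvCategory f, f))).foldl (fun d p => d.modify p.1 [] (· ++ [p.2])) pvD0 := by
  rw [List.foldl_map]

lemma pv_loop_getD (l : List String) (c : String) :
    (l.foldl (fun d f => d.modify (pvCategory f) [] (· ++ [f])) pvD0).getD c []
      = l.filter (fun f => pvCategory f == c) := by
  rw [pv_loop_eq_pairs, PySem.Dict.getD_foldl_modify_append, pv_d0_getD, List.filter_map,
    List.map_map]
  simp [Function.comp_def]

lemma pv_loop_keys (l : List String) :
    (l.foldl (fun d f => d.modify (pvCategory f) [] (· ++ [f])) pvD0).keys = pvNames := by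
  rw [PySem.Dict.keys_foldl_modify_key]
  rw [PySem.Set.update_eq_append_filter]
  have h : (PySem.Set.ofList (l.map pvCategory)).filter (fun y => !(PySem.Set.contains pvD0.keys y)) = [] := by
    rw [List.filter_eq_nil_iff]
    intro a ha
    have : a ∈ l.map pvCategory := (PySem.Set.mem_ofList _ _).mp ha
    obtain ⟨f, _, rfl⟩ := List.mem_map.mp this
    have hm := pv_category_mem f
    rw [show pvD0.keys = pvNames from by decide]
    simp [hm]
  rw [h, List.append_nil]
  decide

lemma pv_loop_nodup (l : List String) :
    (l.foldl (fun d f => d.modify (pvCategory f) [] (· ++ [f])) pvD0).keys.Nodup := by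
  rw [pv_loop_keys]; decide

lemma pv_loop_items (l : List String) :
    (l.foldl (fun d f => d.modify (pvCategory f) [] (· ++ [f])) pvD0).items
      = pvNames.map (fun k => (k, l.filter (fun f => pvCategory f == k))) := by
  rw [PySem.Dict.items_eq_map_keys _ (pv_loop_nodup l) ([] : List String), pv_loop_keys]
  exact List.map_congr_left (fun k _ => by rw [pv_loop_getD])

lemma pv_final_fold (items : List (String × List String)) (hnd : (items.map (·.1)).Nodup) :
    (items.foldl (fun d p => if p.2.isEmpty then d else d.insert p.1 p.2)
      (PySem.Dict.empty : PySem.Dict String (List String))).items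
      = items.filter (fun p => !p.2.isEmpty) := by
  have hbody : (fun (d : PySem.Dict String (List String)) (p : String × List String) =>
      if p.2.isEmpty then d else d.insert p.1 p.2)
      = (fun d p => if !p.2.isEmpty then d.insert p.1 p.2 else d) := by
    funext d p; cases h : p.2.isEmpty <;> simp
  rw [hbody, PySem.List.foldl_if_eq_foldl_filter]
  rw [PySem.Dict.items_foldl_insert_fresh]
  · simp [PySem.Dict.empty]
  · intro a _; exact PySem.Dict.contains_empty _
  · exact ((List.filter_sublist (l := items)).map (·.1)).nodup hnd

-- A's characterisation
lemma pv_A_char (l : List String) :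
    get_feature_categories l
      = (pvNames.map (fun k => (k, l.filter (fun f => pvCategory f == k)))).filter
          (fun p => !p.2.isEmpty) := by
  unfold get_feature_categories
  simp only [pv_step_eq]
  rw [show (PySem.Dict.ofList [("demographics", []), ("service_usage", []), ("billing", []),
    ("contract", []), ("engagement", []), ("engineered", []), ("other", [])]
      : PySem.Dict String (List String)) = pvD0 from rfl]
  rw [pv_loop_items, pv_final_fold]
  simp only [List.map_map]
  have : ((fun x => x.1) ∘ fun k => (k, l.filter (fun f => pvCategory f == k))) = id := rfl
  rw [this, List.map_id]
  decide

-- B side: the staged fold computed recursively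
def pvStaged (t : List (String × List String)) (rem : List String) : List (String × List String) :=
  match t with
  | [] => []
  | e :: t' =>
    (if (rem.filter (fun f => pvCond e.2 f)).isEmpty then []
     else [(e.1, rem.filter (fun f => pvCond e.2 f))]) ++
    pvStaged t' (rem.filter (fun f => !pvCond e.2 f))

def pvRemAfter (t : List (String × List String)) (rem : List String) : List String :=
  match t with
  | [] => rem
  | e :: t' => pvRemAfter t' (rem.filter (fun f => !pvCond e.2 f))

lemma pv_fold_eq (t : List (String × List String)) :
    ∀ (rem : List String) (acc : List (String × List String)),
    t.foldl (fun (st : List (String × List String) × List String) e =>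
        let p := st.2.partition (fun f => pvCond e.2 f)
        (if p.1.isEmpty then st.1 else st.1 ++ [(e.1, p.1)], p.2)) (acc, rem)
      = (acc ++ pvStaged t rem, pvRemAfter t rem) := by
  induction t with
  | nil => intro rem acc; simp [pvStaged, pvRemAfter]
  | cons e t' ih =>
    intro rem acc
    rw [List.foldl_cons]
    rw [show (let p := List.partition (fun f => pvCond e.2 f) (acc, rem).2
        (if p.1.isEmpty then (acc, rem).1 else (acc, rem).1 ++ [(e.1, p.1)], p.2))
        = (if (rem.filter (fun f => pvCond e.2 f)).isEmpty then acc
             else acc ++ [(e.1, rem.filter (fun f => pvCond e.2 f))],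
           rem.filter (fun f => !pvCond e.2 f)) from by
      simp [List.partition_eq_filter_filter, Function.comp_def]]
    rw [ih]
    simp only [pvStaged, pvRemAfter]
    split_ifs with h <;> simp [List.append_assoc]

lemma pv_staged_char (t : List (String × List String)) :
    ∀ rem : List String, (t.map (·.1)).Nodup → "other" ∉ t.map (·.1) →
    pvStaged t rem
      = (t.map (fun e => (e.1, rem.filter (fun f => pvCatIn t f == e.1)))).filter
          (fun p => !p.2.isEmpty) := by
  induction t with
  | nil => intro rem _ _; rfl
  | cons e t' ih =>
    intro rem hnd hoth
    have hnd' : (t'.map (·.1)).Nodup := (List.nodup_cons.mp hnd).2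
    have hne : e.1 ∉ t'.map (·.1) := (List.nodup_cons.mp hnd).1
    have hoe : e.1 ≠ "other" := fun h => hoth (by simp [h])
    have hoth' : "other" ∉ t'.map (·.1) := fun h => hoth (by simp [h])
    have hhead : rem.filter (fun f => pvCatIn (e :: t') f == e.1)
        = rem.filter (fun f => pvCond e.2 f) := by
      apply List.filter_congr
      intro f _
      simp only [pvCatIn]
      cases hc : pvCond e.2 f with
      | true => simp
      | false =>
        simp only [Bool.false_eq_true, if_false]
        rcases pv_catIn_mem t' f with h | h
        · simp [h, (Ne.symm hoe)]
        · simp [show pvCatIn t' f ≠ e.1 from fun he => hne (he ▸ h)]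
    have htail : ∀ e' ∈ t', rem.filter (fun f => pvCatIn (e :: t') f == e'.1)
        = (rem.filter (fun f => !pvCond e.2 f)).filter (fun f => pvCatIn t' f == e'.1) := by
      intro e' he'
      rw [List.filter_filter]
      apply List.filter_congr
      intro f _
      simp only [pvCatIn]
      cases hc : pvCond e.2 f with
      | true =>
        have : e.1 ≠ e'.1 := fun h => hne (h ▸ List.mem_map.mpr ⟨e', he', rfl⟩)
        simp [this]
      | false => simp
    simp only [pvStaged, List.map_cons]
    rw [List.filter_cons, hhead]
    rw [ih (rem.filter (fun f => !pvCond e.2 f)) hnd' hoth']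
    have hmaps : t'.map (fun e' => (e'.1, rem.filter (fun f => pvCatIn (e :: t') f == e'.1)))
        = t'.map (fun e' => (e'.1,
            (rem.filter (fun f => !pvCond e.2 f)).filter (fun f => pvCatIn t' f == e'.1))) :=
      List.map_congr_left (fun e' he' => by rw [htail e' he'])
    rw [hmaps]
    cases h : (rem.filter (fun f => pvCond e.2 f)).isEmpty <;> simp

lemma pv_remAfter_char (t : List (String × List String)) :
    ∀ rem : List String, "other" ∉ t.map (·.1) →
    pvRemAfter t rem = rem.filter (fun f => pvCatIn t f == "other") := by
  induction t with
  | nil => intro rem _; simp [pvRemAfter, pvCatIn]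
  | cons e t' ih =>
    intro rem hoth
    have hoe : e.1 ≠ "other" := fun h => hoth (by simp [h])
    have hoth' : "other" ∉ t'.map (·.1) := fun h => hoth (by simp [h])
    simp only [pvRemAfter]
    rw [ih _ hoth', List.filter_filter]
    apply List.filter_congr
    intro f _
    simp only [pvCatIn]
    cases hc : pvCond e.2 f with
    | true => simp [hoe]
    | false => simp

theorem pv_main_eq (l : List String) : get_feature_categories l = get_feature_categories_alt l := by
  rw [pv_A_char]
  unfold get_feature_categories_alt
  rw [pv_fold_eq pvTable l [], List.nil_append]
  simp only
  rw [pv_staged_char pvTable l (by decide) (by decide), pv_remAfter_char pvTable l (by decide)]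
  rw [show pvNames = pvTable.map (·.1) ++ ["other"] from by decide]
  rw [show (pvTable.map (·.1) ++ ["other"]).map
        (fun k => (k, l.filter (fun f => pvCategory f == k)))
      = pvTable.map (fun e => (e.1, l.filter (fun f => pvCatIn pvTable f == e.1)))
        ++ [("other", l.filter (fun f => pvCatIn pvTable f == "other"))] from by
    rw [List.map_append, List.map_map]; rfl]
  rw [List.filter_append]
  cases h : (l.filter (fun f => pvCatIn pvTable f == "other")).isEmpty <;> simp [h]

-- ===== VERDICT (by name: the statement is the Claim_ definition above) =====
theorem get_feature_categories_spec : Claim_equal_get_feature_categories := by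
  intro l _
  exact pv_main_eq l
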